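-- pv_equiv track=rewrite | github.com/iansedano/aoc | python/aoc/2015/08.py | encoded_length
-- ===== SOURCE A (Python) =====
-- def encoded_length(line: str):
--     new_chars = []
--     char_gen = iter(line)
--     while char := next(char_gen, False):
--         if char in ["\\", '"']:
--             new_chars.append("\\")
--         new_chars.append(char)
--
--     return len(new_chars) + 2
-- ===== SOURCE B (Python) =====
-- def encoded_length(line: str):
--     # Closed formula: each backslash or quote gains one escape char, plus 2 surrounding quotes.
--     return len(line) + line.count("\\") + line.count('"') + 2
-- ===== Notes on version B (the rewrite author's own statement) =====
-- stated objective: simpler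
-- what changed: Replaces the per-character generator loop that materialises an escaped character list with a closed formula len(line) + line.count('\\') + line.count('"') + 2.
import Mathlib
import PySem

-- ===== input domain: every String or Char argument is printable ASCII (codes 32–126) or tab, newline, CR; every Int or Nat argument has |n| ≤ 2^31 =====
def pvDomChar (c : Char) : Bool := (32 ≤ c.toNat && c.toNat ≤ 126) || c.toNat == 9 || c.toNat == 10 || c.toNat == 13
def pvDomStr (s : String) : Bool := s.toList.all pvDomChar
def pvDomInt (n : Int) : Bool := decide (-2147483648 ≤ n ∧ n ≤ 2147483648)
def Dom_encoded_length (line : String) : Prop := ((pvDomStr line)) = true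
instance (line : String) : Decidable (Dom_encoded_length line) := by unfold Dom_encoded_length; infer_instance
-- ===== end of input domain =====

-- B replaces A's per-character loop that builds an escaped-character list with a closed
-- formula over character counts (len + count '\' + count '"' + 2); objective: simpler.


-- ===== PORT A =====
-- A iterates the characters, appending '\' before each backslash or quote and then the
-- character itself, and returns the built list's length plus 2.
def encoded_length (line : String) : Int :=
  let new_chars : List Char :=
    line.toList.foldl
      (fun acc c => (if c = '\\' ∨ c = '"' then acc ++ ['\\'] else acc) ++ [c]) []
  (new_chars.length : Int) + 2

-- ===== PORT B =====
def encoded_length_alt (line : String) : Int :=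
  (PySem.Str.len line : Int) + (PySem.Str.count line "\\" : Int)
    + (PySem.Str.count line "\"" : Int) + 2

-- ===== PRECONDITION & SPEC =====
def Spec_encoded_length (line : String) (out : Int) : Prop := out = encoded_length_alt line
instance (line : String) (out : Int) : Decidable (Spec_encoded_length line out) := by unfold Spec_encoded_length; infer_instance

-- ===== CLAIM (what is proved, stated in full; the proofs are below) =====
def Claim_equal_encoded_length : Prop := ∀ (line : String), Dom_encoded_length line → Spec_encoded_length line (encoded_length line)

-- ===== LEMMAS AND PROOFS =====

-- single-character substring count equals element count
theorem chars_count_go_singleton (c : Char) (cs : List Char) (fuel acc : Nat)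
    (h : cs.length ≤ fuel) :
    PySem.Chars.count.go [c] fuel cs acc = acc + cs.count c := by
  induction cs generalizing fuel acc with
  | nil => cases fuel <;> simp [PySem.Chars.count.go]
  | cons x t ih =>
    cases fuel with
    | zero => simp at h
    | succ n =>
      simp only [List.length_cons, Nat.succ_le_succ_iff] at h
      by_cases hx : x = c
      · subst hx
        simp [PySem.Chars.count.go, List.isPrefixOf, ih _ _ h]
        omega
      · simp [PySem.Chars.count.go, List.isPrefixOf, hx, Ne.symm hx, ih _ _ h]

theorem chars_count_singleton (c : Char) (cs : List Char) :
    PySem.Chars.count cs [c] = cs.count c := by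
  simpa using chars_count_go_singleton c cs cs.length 0 le_rfl

theorem foldl_escape_length (l : List Char) (acc : List Char) :
    (l.foldl (fun acc c => (if c = '\\' ∨ c = '"' then acc ++ ['\\'] else acc) ++ [c]) acc).length
      = acc.length + l.length + l.count '\\' + l.count '"' := by
  induction l generalizing acc with
  | nil => simp
  | cons x t ih =>
    by_cases h1 : x = '\\'
    · subst h1; simp [ih]; omega
    · by_cases h2 : x = '"'
      · subst h2; simp [ih]; omega
      · simp [h1, h2, ih]; omega

-- ===== VERDICT (by name: the statement is the Claim_ definition above) =====
theorem encoded_length_spec : Claim_equal_encoded_length := by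
  intro line _
  unfold Spec_encoded_length encoded_length encoded_length_alt
  simp [PySem.Str.count_eq, PySem.Str.len_eq, chars_count_singleton, foldl_escape_length]
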